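-- pv_equiv track=rewrite | github.com/b0bhat/code-challenges | advent2023/day7.py | sort_in_tiers
-- ===== SOURCE A (Python) =====
-- def sort_in_tiers(sorted_tier, max_freq_of_larger_type=0):
--   sorted_tier.sort(key=lambda x: x[0])
--   if max_freq_of_larger_type != 0:
--     larger_type, smaller_type = [], []
--     for item in sorted_tier:
--       (smaller_type, larger_type
--        )[max(item[2].values()) == max_freq_of_larger_type].append(item)
--     sorted_tier = larger_type + smaller_type
--   return sorted_tier
-- ===== SOURCE B (Python) =====
-- def sort_in_tiers(sorted_tier, max_freq_of_larger_type=0):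
--   sorted_tier.sort(key=lambda x: x[0])
--   if max_freq_of_larger_type == 0:
--     return sorted_tier
--   return sorted(sorted_tier,
--                 key=lambda i: max(i[2].values()) != max_freq_of_larger_type)
-- ===== Notes on version B (the rewrite author's own statement) =====
-- stated objective: idiomatic
-- what changed: The explicit two-bucket partition loop with list concatenation is replaced by a single stable sort on a boolean key (False = item's max frequency equals the threshold), which places the equal-to-max items first while preserving the x[0] order inside each group; Pre_ excludes inputs on which both programs raise ValueError (an empty dict with a nonzero threshold).
import Mathlib
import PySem

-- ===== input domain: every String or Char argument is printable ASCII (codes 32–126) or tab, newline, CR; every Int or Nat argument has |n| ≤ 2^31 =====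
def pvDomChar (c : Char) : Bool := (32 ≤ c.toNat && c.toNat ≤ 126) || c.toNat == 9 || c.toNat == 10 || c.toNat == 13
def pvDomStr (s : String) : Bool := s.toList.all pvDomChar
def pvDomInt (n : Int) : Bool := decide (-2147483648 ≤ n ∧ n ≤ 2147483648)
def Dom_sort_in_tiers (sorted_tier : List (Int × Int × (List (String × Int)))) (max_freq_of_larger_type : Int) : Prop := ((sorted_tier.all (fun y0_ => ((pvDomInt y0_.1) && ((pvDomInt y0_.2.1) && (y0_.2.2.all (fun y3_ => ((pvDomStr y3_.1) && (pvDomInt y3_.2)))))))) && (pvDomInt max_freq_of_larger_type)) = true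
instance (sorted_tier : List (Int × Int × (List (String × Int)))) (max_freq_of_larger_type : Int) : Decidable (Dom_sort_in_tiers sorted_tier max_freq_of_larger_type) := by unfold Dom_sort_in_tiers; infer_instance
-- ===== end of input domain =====

-- B replaces A's explicit two-bucket partition loop by one stable sort on a boolean key;
-- equivalence is about the RETURN value (both Pythons also sort the argument in place by x[0]).

-- ===== PORT A =====
-- max(d.values()); Pre_ guarantees d ≠ [] wherever this is reached, so getD 0 is never taken
def pvMaxVals (d : List (String × Int)) : Int :=
  (PySem.List.max? (d.map (fun p => p.2)) (fun v => v)).getD 0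

def sort_in_tiers (sorted_tier : List (Int × Int × (List (String × Int)))) (max_freq_of_larger_type : Int) : List (Int × Int × (List (String × Int))) :=
  let st := PySem.List.sorted sorted_tier (fun x => x.1) false
  if max_freq_of_larger_type ≠ 0 then
    -- state = (smaller_type, larger_type); boolean indexing appends to larger iff max == threshold
    let r := st.foldl (fun (acc : List (Int × Int × (List (String × Int))) × List (Int × Int × (List (String × Int)))) item =>
      if pvMaxVals item.2.2 = max_freq_of_larger_type then (acc.1, acc.2 ++ [item])
      else (acc.1 ++ [item], acc.2)) ([], [])
    r.2 ++ r.1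
  else st

-- ===== PORT B =====
def sort_in_tiers_alt (sorted_tier : List (Int × Int × (List (String × Int)))) (max_freq_of_larger_type : Int) : List (Int × Int × (List (String × Int))) :=
  let st := PySem.List.sorted sorted_tier (fun x => x.1) false
  if max_freq_of_larger_type = 0 then st
  else PySem.List.sorted st
    (fun i => if pvMaxVals i.2.2 ≠ max_freq_of_larger_type then (1 : Int) else 0) false

-- ===== PRECONDITION & SPEC =====
-- Pre_ excludes exactly the inputs on which Python A raises ValueError (max() of an empty
-- dict's values, reached only when max_freq_of_larger_type != 0); B raises the same error there.
def Pre_sort_in_tiers (sorted_tier : List (Int × Int × (List (String × Int)))) (max_freq_of_larger_type : Int) : Prop :=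
  max_freq_of_larger_type = 0 ∨ ∀ item ∈ sorted_tier, item.2.2 ≠ []
instance (sorted_tier : List (Int × Int × (List (String × Int)))) (max_freq_of_larger_type : Int) : Decidable (Pre_sort_in_tiers sorted_tier max_freq_of_larger_type) := by unfold Pre_sort_in_tiers; infer_instance

def pvWitness_sort_in_tiers : (List (Int × Int × (List (String × Int)))) × Int :=
  ([(2, 1, [("a", 3)]), (1, 2, [("b", 2)]), (3, 0, [("c", 3), ("d", 1)])], 3)

def Spec_sort_in_tiers (sorted_tier : List (Int × Int × (List (String × Int)))) (max_freq_of_larger_type : Int) (out : List (Int × Int × (List (String × Int)))) : Prop := out = sort_in_tiers_alt sorted_tier max_freq_of_larger_type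
instance (sorted_tier : List (Int × Int × (List (String × Int)))) (max_freq_of_larger_type : Int) (out : List (Int × Int × (List (String × Int)))) : Decidable (Spec_sort_in_tiers sorted_tier max_freq_of_larger_type out) := by unfold Spec_sort_in_tiers; infer_instance

-- ===== CLAIM (what is proved, stated in full; the proofs are below) =====
def Claim_equal_sort_in_tiers : Prop := ∀ (sorted_tier : List (Int × Int × (List (String × Int)))) (max_freq_of_larger_type : Int), Dom_sort_in_tiers sorted_tier max_freq_of_larger_type → Pre_sort_in_tiers sorted_tier max_freq_of_larger_type → Spec_sort_in_tiers sorted_tier max_freq_of_larger_type (sort_in_tiers sorted_tier max_freq_of_larger_type)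

-- ===== LEMMAS AND PROOFS =====

-- A's partition loop, characterised: it appends each item to one of the two buckets.
lemma part_foldl (m : Int) : ∀ (l : List (Int × Int × (List (String × Int))))
    (s g : List (Int × Int × (List (String × Int)))),
    l.foldl (fun acc item =>
      if pvMaxVals item.2.2 = m then (acc.1, acc.2 ++ [item])
      else (acc.1 ++ [item], acc.2)) (s, g)
    = (s ++ l.filter (fun x => !decide (pvMaxVals x.2.2 = m)),
       g ++ l.filter (fun x => decide (pvMaxVals x.2.2 = m))) := by
  intro l
  induction l with
  | nil => intro s g; simp
  | cons x t ih =>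
    intro s g
    by_cases hp : pvMaxVals x.2.2 = m
    · simp [List.foldl_cons, hp, ih]
    · simp [List.foldl_cons, hp, ih]

-- insertBy inserts the new element between a prefix it does not go before and a suffix it goes before.
lemma insertBy_pivot {α : Type} (before : α → α → Bool) (x : α) :
    ∀ (A B : List α), (∀ a ∈ A, before x a = false) → (∀ b ∈ B, before x b = true) →
    PySem.List.insertBy before x (A ++ B) = A ++ x :: B := by
  intro A
  induction A with
  | nil =>
    intro B _ hB
    cases B with
    | nil => simp [PySem.List.insertBy]
    | cons b B' => simp [PySem.List.insertBy, hB b (by simp)]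
  | cons a A' ih =>
    intro B hA hB
    have ha : before x a = false := hA a (by simp)
    simp [PySem.List.insertBy, ha]
    exact ih B (fun y hy => hA y (by simp [hy])) hB

-- a stable insertion-sort by the boolean (0/1) key is exactly the partition
lemma ins_foldl (m : Int) : ∀ (l A B : List (Int × Int × (List (String × Int)))),
    (∀ a ∈ A, pvMaxVals a.2.2 = m) → (∀ b ∈ B, ¬ pvMaxVals b.2.2 = m) →
    l.foldl (fun acc x => PySem.List.insertBy
        (fun a b => decide ((if pvMaxVals a.2.2 ≠ m then (1 : Int) else 0)
                          < (if pvMaxVals b.2.2 ≠ m then (1 : Int) else 0))) x acc) (A ++ B)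
    = (A ++ l.filter (fun x => decide (pvMaxVals x.2.2 = m)))
      ++ (B ++ l.filter (fun x => !decide (pvMaxVals x.2.2 = m))) := by
  intro l
  induction l with
  | nil => intro A B _ _; simp
  | cons x t ih =>
    intro A B hA hB
    by_cases hp : pvMaxVals x.2.2 = m
    · rw [List.foldl_cons,
        insertBy_pivot _ x A B
          (fun a ha => by simp [hp, hA a ha])
          (fun b hb => by simp [hp, hB b hb]),
        show A ++ x :: B = (A ++ [x]) ++ B by simp,
        ih (A ++ [x]) B
          (fun a ha => by rcases List.mem_append.1 ha with h | h; exacts [hA a h, by simp at h; exact h ▸ hp])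
          hB]
      simp [hp]
    · rw [List.foldl_cons,
        show A ++ B = (A ++ B) ++ ([] : List _) by simp,
        insertBy_pivot _ x (A ++ B) []
          (fun a _ => by simp only [decide_eq_false_iff_not, not_lt]; split <;> norm_num)
          (fun b hb => by simp at hb),
        show (A ++ B) ++ x :: [] = A ++ (B ++ [x]) by simp,
        ih A (B ++ [x]) hA
          (fun b hb => by rcases List.mem_append.1 hb with h | h; exacts [hB b h, by simp at h; exact h ▸ hp])]
      simp [hp]

lemma sorted_partition (m : Int) (l : List (Int × Int × (List (String × Int)))) :
    PySem.List.sorted l (fun i => if pvMaxVals i.2.2 ≠ m then (1 : Int) else 0) false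
    = l.filter (fun x => decide (pvMaxVals x.2.2 = m))
      ++ l.filter (fun x => !decide (pvMaxVals x.2.2 = m)) := by
  rw [PySem.List.sorted_eq_foldl_insertBy]
  simpa using ins_foldl m l [] [] (by simp) (by simp)

-- ===== VERDICT (by name: the statement is the Claim_ definition above) =====
theorem sort_in_tiers_spec : Claim_equal_sort_in_tiers := by
  intro sorted_tier m _ _
  unfold Spec_sort_in_tiers sort_in_tiers sort_in_tiers_alt
  by_cases hm : m = 0
  · simp [hm]
  · simp only [hm, if_neg, if_pos, ne_eq, not_false_iff]
    rw [part_foldl, sorted_partition]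
    simp
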